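-- pv_equiv track=rewrite | github.com/randysalars/dreamweaving | scripts/ai/knowledge_tools.py | _apply_title_pattern
-- ===== SOURCE A (Python) =====
-- from typing import Optional, List, Dict, Any, Union
--
-- def _apply_title_pattern(template: str, topic: str, outcome: Optional[str]) -> Optional[str]:
--     """Apply a title pattern template to generate a specific title."""
--     # Common pattern replacements
--     replacements = {
--         "[DURATION]": "30-Minute",
--         "[BENEFIT]": outcome.title() if outcome else "Deep Relaxation",
--         "[FREQUENCY]": "Theta Waves",
--         "[HZ]": "7Hz",
--         "[TOPIC]": topic.title(),
--         "[ADJECTIVE]": "DEEPEST" if outcome in ["sleep", "relaxation"] else "POWERFUL",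
--         "[OUTCOME]": outcome.title() if outcome else "Transformation",
--         "[MODIFIER]": "For Deep Sleep" if outcome == "sleep" else "Guided Journey",
--     }
--
--     result = template
--     for placeholder, value in replacements.items():
--         result = result.replace(placeholder, value)
--
--     # If still has unreplaced brackets, skip
--     if "[" in result:
--         return None
--
--     return result
-- ===== SOURCE B (Python) =====
-- def _placeholder_value(name, topic, outcome):
--     """Value for one placeholder name (no dict: a direct name -> value function)."""
--     if name == "DURATION":
--         return "30-Minute"
--     if name == "BENEFIT":
--         return outcome.title() if outcome else "Deep Relaxation"
--     if name == "FREQUENCY":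
--         return "Theta Waves"
--     if name == "HZ":
--         return "7Hz"
--     if name == "TOPIC":
--         return topic.title()
--     if name == "ADJECTIVE":
--         return "DEEPEST" if outcome in ["sleep", "relaxation"] else "POWERFUL"
--     if name == "OUTCOME":
--         return outcome.title() if outcome else "Transformation"
--     return "For Deep Sleep" if outcome == "sleep" else "Guided Journey"
--
--
-- def _substitute(s, names, topic, outcome):
--     """Recursively substitute each named placeholder by tokenizing (split) and
--     reassembling (join) instead of scanning with str.replace."""
--     if not names:
--         return s
--     name = names[0]
--     pieces = s.split("[" + name + "]")
--     return _substitute(_placeholder_value(name, topic, outcome).join(pieces),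
--                        names[1:], topic, outcome)
--
--
-- def _apply_title_pattern(template, topic, outcome):
--     """Apply a title pattern template to generate a specific title."""
--     result = _substitute(template,
--                          ["DURATION", "BENEFIT", "FREQUENCY", "HZ",
--                           "TOPIC", "ADJECTIVE", "OUTCOME", "MODIFIER"],
--                          topic, outcome)
--     if "[" in result:
--         return None
--     return result
-- ===== Notes on version B (the rewrite author's own statement) =====
-- stated objective: alternative
-- what changed: Drops the replacements dict in favour of a name->value function and performs each of the eight substitutions by tokenize-and-reassemble (value.join(s.split(key))) inside a recursion over the placeholder names, instead of the iterative loop of str.replace scans.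
import Mathlib
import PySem

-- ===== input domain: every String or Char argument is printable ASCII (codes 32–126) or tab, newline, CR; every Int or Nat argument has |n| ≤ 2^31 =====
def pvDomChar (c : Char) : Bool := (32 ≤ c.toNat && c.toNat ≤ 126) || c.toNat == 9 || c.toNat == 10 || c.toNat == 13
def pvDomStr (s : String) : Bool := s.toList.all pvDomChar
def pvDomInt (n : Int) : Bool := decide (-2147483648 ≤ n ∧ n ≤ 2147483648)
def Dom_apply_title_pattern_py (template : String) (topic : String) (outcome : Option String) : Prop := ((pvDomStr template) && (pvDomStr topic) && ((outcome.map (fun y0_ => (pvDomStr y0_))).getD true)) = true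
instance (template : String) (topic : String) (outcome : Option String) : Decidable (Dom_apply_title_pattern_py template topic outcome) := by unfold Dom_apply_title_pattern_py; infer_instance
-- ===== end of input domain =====

-- B replaces A's dict + loop of str.replace scans by a name→value function and a recursion over the
-- placeholder names that substitutes each key by tokenize-and-reassemble (value.join(s.split(key)));
-- same return value on every input (both are total).

-- ===== PORT A =====
-- A's Python str.title(), ported as a direct recursion (exact on the ASCII domain, where a "cased"
-- character is exactly an ASCII letter; the Bool is "previous character was cased")
def pvTitleCharsA : List Char → Bool → List Char
  | [], _ => []
  | c :: t, prev =>
      (if c.isAlpha then (if prev then c.toLower else c.toUpper) else c) :: pvTitleCharsA t c.isAlpha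

def pvTitleStrA (s : String) : String := String.ofList (pvTitleCharsA s.toList false)

-- A's `replacements` dict, an association list in insertion order; `outcome.title() if outcome else d`
-- reads Python truthiness: None and "" both give the default
def pvRepsA (topic : String) (outcome : Option String) : List (String × String) :=
  [("[DURATION]", "30-Minute"),
   ("[BENEFIT]", match outcome with
                 | some o => if o = "" then "Deep Relaxation" else pvTitleStrA o
                 | none => "Deep Relaxation"),
   ("[FREQUENCY]", "Theta Waves"),
   ("[HZ]", "7Hz"),
   ("[TOPIC]", pvTitleStrA topic),
   ("[ADJECTIVE]", if outcome = some "sleep" ∨ outcome = some "relaxation" then "DEEPEST" else "POWERFUL"),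
   ("[OUTCOME]", match outcome with
                 | some o => if o = "" then "Transformation" else pvTitleStrA o
                 | none => "Transformation"),
   ("[MODIFIER]", if outcome = some "sleep" then "For Deep Sleep" else "Guided Journey")]

def apply_title_pattern_py (template : String) (topic : String) (outcome : Option String) : Option String :=
  let replacements := pvRepsA topic outcome
  let result := replacements.foldl (fun r kv => PySem.Str.replace r kv.1 kv.2) template
  if PySem.Str.isIn "[" result then none else some result

-- ===== PORT B =====
-- Source B's str.title(), ported as its own single left fold with a (prevCased, reversed output) accumulator
def pvTitleB (s : String) : String :=
  String.ofList
    ((s.toList.foldl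
        (fun (st : Bool × List Char) c =>
          (c.isAlpha, (if c.isAlpha then (if st.1 then c.toLower else c.toUpper) else c) :: st.2))
        (false, [])).2.reverse)

-- Source B's `_placeholder_value`: the early-return if-chain, name → value
def pvValueB (name : String) (topic : String) (outcome : Option String) : String :=
  if name = "DURATION" then "30-Minute"
  else if name = "BENEFIT" then
    match outcome with
    | some o => if o = "" then "Deep Relaxation" else pvTitleB o
    | none => "Deep Relaxation"
  else if name = "FREQUENCY" then "Theta Waves"
  else if name = "HZ" then "7Hz"
  else if name = "TOPIC" then pvTitleB topic
  else if name = "ADJECTIVE" then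
    (if outcome = some "sleep" ∨ outcome = some "relaxation" then "DEEPEST" else "POWERFUL")
  else if name = "OUTCOME" then
    match outcome with
    | some o => if o = "" then "Transformation" else pvTitleB o
    | none => "Transformation"
  else (if outcome = some "sleep" then "For Deep Sleep" else "Guided Journey")

-- Source B's `_substitute`: recursion over the names; "[" + name + "]" built on code points;
-- str.split / str.join are PySem.Chars.splitOn / PySem.Chars.join
def pvSubstB (topic : String) (outcome : Option String) : List String → List Char → List Char
  | [], s => s
  | n :: rest, s =>
      pvSubstB topic outcome rest
        (PySem.Chars.join (pvValueB n topic outcome).toList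
          (PySem.Chars.splitOn s ('[' :: n.toList ++ [']'])))

def pvNamesB : List String :=
  ["DURATION", "BENEFIT", "FREQUENCY", "HZ", "TOPIC", "ADJECTIVE", "OUTCOME", "MODIFIER"]

def apply_title_pattern_py_alt (template : String) (topic : String) (outcome : Option String) : Option String :=
  let result := pvSubstB topic outcome pvNamesB template.toList
  if PySem.Chars.isIn ['['] result then none else some (String.ofList result)

-- ===== PRECONDITION & SPEC =====
def Spec_apply_title_pattern_py (template : String) (topic : String) (outcome : Option String) (out : Option String) : Prop := out = apply_title_pattern_py_alt template topic outcome
instance (template : String) (topic : String) (outcome : Option String) (out : Option String) : Decidable (Spec_apply_title_pattern_py template topic outcome out) := by unfold Spec_apply_title_pattern_py; infer_instance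

-- ===== CLAIM (what is proved, stated in full; the proofs are below) =====
def Claim_equal_apply_title_pattern_py : Prop := ∀ (template : String) (topic : String) (outcome : Option String), Dom_apply_title_pattern_py template topic outcome → Spec_apply_title_pattern_py template topic outcome (apply_title_pattern_py template topic outcome)

-- ===== LEMMAS AND PROOFS =====

-- ---------- a clean spine for Python str.replace ----------

def pvRepl (old new : List Char) (l : List Char) : List Char :=
  match l with
  | [] => []
  | c :: t =>
    if old ≠ [] ∧ old.isPrefixOf (c :: t) then
      new ++ pvRepl old new (t.drop (old.length - 1))
    else c :: pvRepl old new t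
termination_by l.length
decreasing_by all_goals simp [List.length_drop]

theorem pvRepl_nil (old new : List Char) : pvRepl old new [] = [] := by simp [pvRepl]

theorem pvRepl_pos {old : List Char} (new : List Char) {l : List Char}
    (h : old <+: l) (hne : old ≠ []) :
    pvRepl old new l = new ++ pvRepl old new (l.drop old.length) := by
  obtain ⟨c, t, rfl⟩ : ∃ c t, l = c :: t := by
    cases l with
    | nil => exact absurd (List.prefix_nil.1 h) hne
    | cons c t => exact ⟨c, t, rfl⟩
  have hd : (c :: t).drop old.length = t.drop (old.length - 1) := by
    cases old with
    | nil => exact absurd rfl hne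
    | cons a o => simp
  rw [hd]
  simp only [pvRepl]
  rw [if_pos ⟨hne, List.isPrefixOf_iff_prefix.2 h⟩]

theorem pvRepl_neg {old : List Char} (new : List Char) {c : Char} {t : List Char}
    (h : ¬ old <+: (c :: t)) :
    pvRepl old new (c :: t) = c :: pvRepl old new t := by
  simp only [pvRepl]
  rw [if_neg]
  intro ⟨_, hp⟩
  exact h (List.isPrefixOf_iff_prefix.1 hp)

theorem pvGo_eq {old : List Char} (new : List Char) (hne : old ≠ []) :
    ∀ (fuel : Nat) (l acc : List Char), l.length ≤ fuel →
      PySem.Chars.replace.go old new fuel l acc = acc.reverse ++ pvRepl old new l := by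
  intro fuel
  induction fuel with
  | zero =>
    intro l acc hl
    have : l = [] := List.length_eq_zero_iff.1 (Nat.le_zero.1 hl)
    subst this
    simp [PySem.Chars.replace.go, pvRepl_nil]
  | succ n ih =>
    intro l acc hl
    cases l with
    | nil => simp [PySem.Chars.replace.go, pvRepl_nil]
    | cons c t =>
      by_cases hp : old <+: (c :: t)
      · rw [show PySem.Chars.replace.go old new (n+1) (c :: t) acc =
            (if old.isPrefixOf (c :: t) then
              PySem.Chars.replace.go old new n (List.drop old.length (c :: t)) (new.reverse ++ acc)
            else PySem.Chars.replace.go old new n t (c :: acc)) from rfl]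
        rw [if_pos (List.isPrefixOf_iff_prefix.2 hp)]
        rw [ih _ _ (by
          have hop : 0 < old.length := List.length_pos_of_ne_nil hne
          simp only [List.length_drop, List.length_cons] at hl ⊢
          omega)]
        rw [pvRepl_pos new hp hne]
        simp
      · rw [show PySem.Chars.replace.go old new (n+1) (c :: t) acc =
            (if old.isPrefixOf (c :: t) then
              PySem.Chars.replace.go old new n (List.drop old.length (c :: t)) (new.reverse ++ acc)
            else PySem.Chars.replace.go old new n t (c :: acc)) from rfl]
        rw [if_neg (fun hb => hp (List.isPrefixOf_iff_prefix.1 hb))]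
        rw [ih _ _ (by simpa using Nat.le_of_succ_le_succ hl)]
        rw [pvRepl_neg new hp]
        simp

theorem pvReplace_eq {old : List Char} (new l : List Char) (hne : old ≠ []) :
    PySem.Chars.replace l old new = pvRepl old new l := by
  unfold PySem.Chars.replace
  rw [if_neg (by simpa [List.isEmpty_iff] using hne)]
  rw [pvGo_eq new hne l.length l [] le_rfl]
  simp

-- ---------- a clean spine for Python str.split(sep) ----------

def pvParts (sep : List Char) (l : List Char) : List (List Char) :=
  match l with
  | [] => [[]]
  | c :: t =>
    if sep.isPrefixOf (c :: t) then [] :: pvParts sep (t.drop (sep.length - 1))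
    else
      match pvParts sep t with
      | [] => [[c]]
      | h :: r => (c :: h) :: r
termination_by l.length
decreasing_by all_goals simp [List.length_drop]

theorem pvParts_ne_nil (sep l : List Char) : pvParts sep l ≠ [] := by
  cases l with
  | nil => simp [pvParts]
  | cons c t =>
    rw [pvParts]
    split
    · simp
    · split <;> simp

theorem pvSplitGo_eq {sep : List Char} (hne : sep ≠ []) :
    ∀ (fuel : Nat) (l cur : List Char) (acc : List (List Char)), l.length < fuel →
      PySem.Chars.splitOn.go sep fuel l cur acc
        = acc.reverse ++ (pvParts sep l).modifyHead (cur.reverse ++ ·) := by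
  intro fuel
  induction fuel with
  | zero => intro l cur acc hl; omega
  | succ n ih =>
    intro l cur acc hl
    cases l with
    | nil =>
      show (cur.reverse :: acc).reverse = acc.reverse ++ (pvParts sep []).modifyHead (cur.reverse ++ ·)
      simp [pvParts]
    | cons c t =>
      by_cases hp : sep <+: (c :: t)
      · rw [show PySem.Chars.splitOn.go sep (n+1) (c :: t) cur acc =
            (if sep.isPrefixOf (c :: t) then
              PySem.Chars.splitOn.go sep n (List.drop sep.length (c :: t)) [] (cur.reverse :: acc)
            else PySem.Chars.splitOn.go sep n t (c :: cur) acc) from rfl]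
        rw [if_pos (List.isPrefixOf_iff_prefix.2 hp)]
        have hd : (c :: t).drop sep.length = t.drop (sep.length - 1) := by
          cases sep with
          | nil => exact absurd rfl hne
          | cons a o => simp
        rw [hd, ih _ _ _ (by simp only [List.length_drop, List.length_cons] at hl ⊢; omega)]
        rw [show pvParts sep (c :: t) = [] :: pvParts sep (t.drop (sep.length - 1)) by
          rw [pvParts]; rw [if_pos (List.isPrefixOf_iff_prefix.2 hp)]]
        cases hq : pvParts sep (t.drop (sep.length - 1)) with
        | nil => exact absurd hq (pvParts_ne_nil _ _)
        | cons h r => simp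
      · rw [show PySem.Chars.splitOn.go sep (n+1) (c :: t) cur acc =
            (if sep.isPrefixOf (c :: t) then
              PySem.Chars.splitOn.go sep n (List.drop sep.length (c :: t)) [] (cur.reverse :: acc)
            else PySem.Chars.splitOn.go sep n t (c :: cur) acc) from rfl]
        rw [if_neg (fun hb => hp (List.isPrefixOf_iff_prefix.1 hb))]
        rw [ih _ _ _ (by simp only [List.length_cons] at hl ⊢; omega)]
        rw [show pvParts sep (c :: t) =
            (match pvParts sep t with
             | [] => [[c]]
             | h :: r => (c :: h) :: r) by
          rw [pvParts]; rw [if_neg (fun hb => hp (List.isPrefixOf_iff_prefix.1 hb))]]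
        cases hq : pvParts sep t with
        | nil => exact absurd hq (pvParts_ne_nil _ _)
        | cons h r => simp

theorem pvSplitOn_eq {sep : List Char} (l : List Char) (hne : sep ≠ []) :
    PySem.Chars.splitOn l sep = pvParts sep l := by
  show PySem.Chars.splitOn.go sep (l.length + 1) l [] [] = pvParts sep l
  rw [pvSplitGo_eq hne (l.length + 1) l [] [] (by omega)]
  cases hq : pvParts sep l with
  | nil => exact absurd hq (pvParts_ne_nil _ _)
  | cons h r => simp

-- ---------- join ∘ split = replace ----------

theorem pvJoin_parts {sep : List Char} (v : List Char) (hne : sep ≠ []) :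
    ∀ (fuel : Nat) (l : List Char), l.length ≤ fuel →
      PySem.Chars.join v (pvParts sep l) = pvRepl sep v l := by
  intro fuel
  induction fuel with
  | zero =>
    intro l hl
    have : l = [] := List.length_eq_zero_iff.1 (Nat.le_zero.1 hl)
    subst this
    simp [pvParts, pvRepl_nil, PySem.Chars.join, List.intercalate]
  | succ n ih =>
    intro l hl
    cases l with
    | nil => simp [pvParts, pvRepl_nil, PySem.Chars.join, List.intercalate]
    | cons c t =>
      by_cases hp : sep <+: (c :: t)
      · rw [show pvParts sep (c :: t) = [] :: pvParts sep (t.drop (sep.length - 1)) by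
          rw [pvParts]; rw [if_pos (List.isPrefixOf_iff_prefix.2 hp)]]
        have hd : (c :: t).drop sep.length = t.drop (sep.length - 1) := by
          cases sep with
          | nil => exact absurd rfl hne
          | cons a o => simp
        rw [pvRepl_pos v hp hne, hd]
        rw [← ih _ (by simp only [List.length_drop, List.length_cons] at hl ⊢; omega)]
        cases hq : pvParts sep (t.drop (sep.length - 1)) with
        | nil => exact absurd hq (pvParts_ne_nil _ _)
        | cons h r =>
          rw [PySem.Chars.join_cons_cons]
          simp [PySem.Chars.join]
      · rw [show pvParts sep (c :: t) =
            (match pvParts sep t with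
             | [] => [[c]]
             | h :: r => (c :: h) :: r) by
          rw [pvParts]; rw [if_neg (fun hb => hp (List.isPrefixOf_iff_prefix.1 hb))]]
        rw [pvRepl_neg v hp]
        rw [← ih _ (by simp only [List.length_cons] at hl ⊢; omega)]
        cases hq : pvParts sep t with
        | nil => exact absurd hq (pvParts_ne_nil _ _)
        | cons h r =>
          cases r with
          | nil => simp [PySem.Chars.join, List.intercalate]
          | cons h2 r2 =>
            rw [PySem.Chars.join_cons_cons, PySem.Chars.join_cons_cons]
            simp

-- one substitution step of B equals one replace pass of A (the key '['::n++[']'] is never empty)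
theorem pvStepB (n : String) (v l : List Char) :
    PySem.Chars.join v (PySem.Chars.splitOn l ('[' :: n.toList ++ [']']))
      = PySem.Chars.replace l ('[' :: n.toList ++ [']']) v := by
  rw [pvSplitOn_eq l (by simp), pvReplace_eq v l (by simp)]
  exact pvJoin_parts v (by simp) l.length l le_rfl

-- ---------- the two title ports agree ----------

theorem pvTitleB_inv :
    ∀ (l : List Char) (b : Bool) (acc : List Char),
      ((l.foldl
          (fun (st : Bool × List Char) c =>
            (c.isAlpha, (if c.isAlpha then (if st.1 then c.toLower else c.toUpper) else c) :: st.2))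
          (b, acc)).2).reverse
        = acc.reverse ++ pvTitleCharsA l b := by
  intro l
  induction l with
  | nil => intro b acc; simp [pvTitleCharsA]
  | cons c t ih =>
    intro b acc
    simp only [List.foldl_cons, pvTitleCharsA]
    rw [ih]
    simp

theorem pvTitleB_eq (s : String) : pvTitleB s = pvTitleStrA s := by
  unfold pvTitleB pvTitleStrA
  rw [pvTitleB_inv s.toList false []]
  simp

-- ---------- String-level fold down to Chars ----------

theorem pv_foldl_toList (ps : List (String × String)) :
    ∀ (s : String),
      (ps.foldl (fun r kv => PySem.Str.replace r kv.1 kv.2) s).toList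
        = ps.foldl (fun r kv => PySem.Chars.replace r kv.1.toList kv.2.toList) s.toList := by
  induction ps with
  | nil => intro s; simp
  | cons kv rest ih =>
    intro s
    simp only [List.foldl_cons]
    rw [ih (PySem.Str.replace s kv.1 kv.2), PySem.Str.toList_replace]

-- ---------- the eight passes coincide ----------

theorem pv_result_eq (template topic : String) (outcome : Option String) :
    ((pvRepsA topic outcome).foldl (fun r kv => PySem.Str.replace r kv.1 kv.2) template).toList
      = pvSubstB topic outcome pvNamesB template.toList := by
  rw [pv_foldl_toList]
  simp only [pvRepsA, pvNamesB, pvSubstB, List.foldl_cons, List.foldl_nil, pvStepB]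
  simp only [pvValueB, pvTitleB_eq]
  norm_num
  rfl

-- ===== VERDICT (by name: the statement is the Claim_ definition above) =====
theorem apply_title_pattern_py_spec : Claim_equal_apply_title_pattern_py := by
  intro template topic outcome _
  unfold Spec_apply_title_pattern_py
  simp only [apply_title_pattern_py, apply_title_pattern_py_alt]
  rw [← pv_result_eq template topic outcome]
  have hguard : PySem.Chars.isIn ['[']
      (((pvRepsA topic outcome).foldl (fun r kv => PySem.Str.replace r kv.1 kv.2) template).toList)
      = PySem.Str.isIn "[" ((pvRepsA topic outcome).foldl (fun r kv => PySem.Str.replace r kv.1 kv.2) template) := rfl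
  rw [hguard]
  split
  · rfl
  · rw [String.ofList_toList]
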